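-- pv_equiv track=rewrite | github.com/siegmound/ML_SC2 | scripts/54_run_rf_full.py | infer_profile_columns
-- ===== SOURCE A (Python) =====
-- def infer_profile_columns(columns, profile):
--     base_drop = {'p1_wins', 'replay_id', 'time_sec'}
--     feats = [c for c in columns if c not in base_drop]
--     if profile == 'full':
--         return feats
--     if profile == 'no_counter':
--         return [c for c in feats if 'counter' not in c.lower()]
--     if profile == 'no_counter_no_losses':
--         out = []
--         for c in feats:
--             cl = c.lower()
--             if 'counter' in cl:
--                 continue
--             if 'loss' in cl or 'recently_lost' in cl:
--                 continue
--             out.append(c)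
--         return out
--     raise ValueError(f'Unknown profile: {profile}')
-- ===== SOURCE B (Python) =====
-- PROFILE_RULES = {
--     'full': [],
--     'no_counter': ['counter'],
--     'no_counter_no_losses': ['counter', 'loss', 'recently_lost'],
-- }
--
--
-- def _strip_matching(cols, subs):
--     """Recursively apply one filtering pass per forbidden substring."""
--     if not subs:
--         return cols
--     head, tail = subs[0], subs[1:]
--     return _strip_matching([c for c in cols if head not in c.lower()], tail)
--
--
-- def infer_profile_columns(columns, profile):
--     try:
--         subs = PROFILE_RULES[profile]
--     except KeyError:
--         raise ValueError(f'Unknown profile: {profile}')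
--     kept = [c for c in columns if c not in ('p1_wins', 'replay_id', 'time_sec')]
--     return _strip_matching(kept, subs)
-- ===== Notes on version B (the rewrite author's own statement) =====
-- stated objective: alternative
-- what changed: Replaces A's three bespoke branches (plain return / filtering comprehension / accumulator loop with continue) by a rule table plus a recursive helper that applies one separate filtering pass per forbidden substring (staged passes instead of one pass with a combined predicate).
import Mathlib
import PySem

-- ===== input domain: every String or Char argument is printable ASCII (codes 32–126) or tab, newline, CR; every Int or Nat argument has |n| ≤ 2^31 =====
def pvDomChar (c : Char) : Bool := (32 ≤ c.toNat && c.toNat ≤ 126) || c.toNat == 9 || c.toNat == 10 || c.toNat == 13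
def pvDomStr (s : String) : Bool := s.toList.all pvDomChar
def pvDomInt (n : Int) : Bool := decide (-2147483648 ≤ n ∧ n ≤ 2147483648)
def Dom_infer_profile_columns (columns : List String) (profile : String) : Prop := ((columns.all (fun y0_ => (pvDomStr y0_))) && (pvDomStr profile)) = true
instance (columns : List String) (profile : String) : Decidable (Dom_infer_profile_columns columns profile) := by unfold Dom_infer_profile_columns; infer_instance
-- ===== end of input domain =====

-- B replaces A's three bespoke branches by a rule table and a recursive helper that
-- applies one filtering pass per forbidden substring; equivalence proved on valid profiles.

-- ===== PORT A =====
def infer_profile_columns (columns : List String) (profile : String) : List String :=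
  let base_drop : PySem.Set String := PySem.Set.ofList ["p1_wins", "replay_id", "time_sec"]
  let feats := columns.filter (fun c => !(base_drop.contains c))
  if profile == "full" then feats
  else if profile == "no_counter" then
    feats.filter (fun c => !(PySem.Str.isIn "counter" (PySem.Str.lower c)))
  else if profile == "no_counter_no_losses" then
    feats.foldl (fun out c =>
      let cl := PySem.Str.lower c
      if PySem.Str.isIn "counter" cl then out
      else if PySem.Str.isIn "loss" cl || PySem.Str.isIn "recently_lost" cl then out
      else out ++ [c]) []
  else []  -- Python raises ValueError here; excluded by Pre_infer_profile_columns

-- ===== PORT B =====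
def pvProfileRules : PySem.Dict String (List String) :=
  PySem.Dict.ofList [("full", []), ("no_counter", ["counter"]),
                     ("no_counter_no_losses", ["counter", "loss", "recently_lost"])]

-- recursive helper: one filtering pass per forbidden substring
def pvStripMatching (cols : List String) (subs : List String) : List String :=
  match subs with
  | [] => cols
  | head :: tail =>
      pvStripMatching (cols.filter (fun c => !(PySem.Str.isIn head (PySem.Str.lower c)))) tail

def infer_profile_columns_alt (columns : List String) (profile : String) : List String :=
  match pvProfileRules.get? profile with
  | none => []  -- Python raises ValueError (from KeyError); excluded by Pre_
  | some subs =>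
      let kept := columns.filter (fun c =>
        !(c == "p1_wins" || c == "replay_id" || c == "time_sec"))
      pvStripMatching kept subs

-- ===== PRECONDITION & SPEC =====
-- Pre_ excludes exactly the unknown profiles, on which A raises ValueError.
def Pre_infer_profile_columns (columns : List String) (profile : String) : Prop :=
  profile = "full" ∨ profile = "no_counter" ∨ profile = "no_counter_no_losses"
instance (_columns : List String) (profile : String) : Decidable (Pre_infer_profile_columns _columns profile) := by unfold Pre_infer_profile_columns; infer_instance

def pvWitness_infer_profile_columns : List String × String :=
  (["p1_wins", "Counter_x", "my_loss", "ok"], "no_counter")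

def Spec_infer_profile_columns (columns : List String) (profile : String) (out : List String) : Prop := out = infer_profile_columns_alt columns profile
instance (columns : List String) (profile : String) (out : List String) : Decidable (Spec_infer_profile_columns columns profile out) := by unfold Spec_infer_profile_columns; infer_instance

-- ===== CLAIM =====
def Claim_equal_infer_profile_columns : Prop := ∀ (columns : List String) (profile : String), Dom_infer_profile_columns columns profile → Pre_infer_profile_columns columns profile → Spec_infer_profile_columns columns profile (infer_profile_columns columns profile)

-- ===== LEMMAS AND PROOFS =====

theorem filter_filter_eq (l : List String) (p q : String → Bool) :
    (l.filter p).filter q = l.filter (fun c => p c && q c) := by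
  simp [List.filter_filter, Bool.and_comm]

-- the staged passes collapse to one filter with the conjunction of all tests
theorem strip_eq_filter (subs : List String) (cols : List String) :
    pvStripMatching cols subs =
    cols.filter (fun c => subs.all (fun sub => !(PySem.Str.isIn sub (PySem.Str.lower c)))) := by
  induction subs generalizing cols with
  | nil => simp [pvStripMatching]
  | cons head tail ih =>
      simp only [pvStripMatching, ih, filter_filter_eq, List.all_cons]

-- the fold body 'skip on p1; skip on p2; else append' as a single guarded append
theorem ite_skip (out : List String) (c : String) (p1 p2 : Bool) :
    (if p1 = true then out else if p2 = true then out else out ++ [c]) =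
    (if (!p1 && !p2) = true then out ++ [c] else out) := by
  cases p1 <;> cases p2 <;> simp

-- A's explicit accumulator loop is the filter of its combined test.
theorem loop_eq_filter (feats : List String) :
    feats.foldl (fun out c =>
      let cl := PySem.Str.lower c
      if PySem.Str.isIn "counter" cl then out
      else if PySem.Str.isIn "loss" cl || PySem.Str.isIn "recently_lost" cl then out
      else out ++ [c]) [] =
    feats.filter (fun c =>
      !(PySem.Str.isIn "counter" (PySem.Str.lower c)) &&
      !(PySem.Str.isIn "loss" (PySem.Str.lower c) || PySem.Str.isIn "recently_lost" (PySem.Str.lower c))) := by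
  have h := PySem.List.foldl_append_if_eq_filter
    (l := feats) (acc := ([] : List String))
    (p := fun c =>
      !(PySem.Str.isIn "counter" (PySem.Str.lower c)) &&
      !(PySem.Str.isIn "loss" (PySem.Str.lower c) || PySem.Str.isIn "recently_lost" (PySem.Str.lower c)))
  rw [List.nil_append] at h
  rw [← h]
  congr 1
  funext out c
  exact ite_skip out c _ _

-- ===== VERDICT =====
theorem infer_profile_columns_spec : Claim_equal_infer_profile_columns := by
  intro columns profile _ hpre
  unfold Spec_infer_profile_columns infer_profile_columns infer_profile_columns_alt
  rcases hpre with h | h | h <;> subst h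
  · have hg : pvProfileRules.get? "full" = some [] := by decide
    simp only [hg, strip_eq_filter, List.all_nil, List.filter_true]
    simp only [String.reduceBEq, BEq.rfl, reduceIte]
    apply List.filter_congr
    intro a _
    simp [beq_eq_decide, Bool.and_assoc]
  · have hg : pvProfileRules.get? "no_counter" = some ["counter"] := by decide
    simp only [hg, strip_eq_filter, filter_filter_eq]
    simp only [String.reduceBEq, BEq.rfl, reduceIte]
    apply List.filter_congr
    intro a _
    simp [beq_eq_decide, Bool.and_assoc]
  · have hg : pvProfileRules.get? "no_counter_no_losses" = some ["counter", "loss", "recently_lost"] := by decide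
    simp only [hg, strip_eq_filter, loop_eq_filter, filter_filter_eq]
    simp only [String.reduceBEq, BEq.rfl, reduceIte]
    apply List.filter_congr
    intro a _
    simp only [List.all_cons, List.all_nil, Bool.and_true]
    cases h2 : PySem.Str.isIn "counter" (PySem.Str.lower a) <;>
      cases h3 : PySem.Str.isIn "loss" (PySem.Str.lower a) <;>
      cases h4 : PySem.Str.isIn "recently_lost" (PySem.Str.lower a) <;>
      simp_all [beq_eq_decide, Bool.and_assoc]
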